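-- pv_equiv track=rewrite | github.com/naezzell/edd | src/edd/data/_ibmq_data.py | get_grover_succ_and_fail_num
-- ===== SOURCE A (Python) =====
-- def get_grover_succ_and_fail_num(dict_counts, num_qubits_measured, markers):
--     if type(markers) is not list:
--         markers = [markers]
--
--     total_counts = 0
--     success_num = 0
--     for key, value in dict_counts.items():
--         total_counts += value
--         if str(key) in markers:
--             success_num += value
--
--     return success_num, (total_counts - success_num)
-- ===== SOURCE B (Python) =====
-- def get_grover_succ_and_fail_num(dict_counts, num_qubits_measured, markers):
--     if type(markers) is not list:
--         markers = [markers]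
--
--     index = {}
--     for key, value in dict_counts.items():
--         index[str(key)] = index.get(str(key), 0) + value
--     total_counts = sum(dict_counts.values())
--
--     success_num = 0
--     for marker in set(markers):
--         success_num += index.get(marker, 0)
--
--     return success_num, total_counts - success_num
-- ===== Notes on version B (the rewrite author's own statement) =====
-- stated objective: alternative
-- what changed: B builds an index dict of accumulated counts once and computes the success count by looking up each deduplicated marker, instead of testing every count key for membership in the markers list.
import Mathlib
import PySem

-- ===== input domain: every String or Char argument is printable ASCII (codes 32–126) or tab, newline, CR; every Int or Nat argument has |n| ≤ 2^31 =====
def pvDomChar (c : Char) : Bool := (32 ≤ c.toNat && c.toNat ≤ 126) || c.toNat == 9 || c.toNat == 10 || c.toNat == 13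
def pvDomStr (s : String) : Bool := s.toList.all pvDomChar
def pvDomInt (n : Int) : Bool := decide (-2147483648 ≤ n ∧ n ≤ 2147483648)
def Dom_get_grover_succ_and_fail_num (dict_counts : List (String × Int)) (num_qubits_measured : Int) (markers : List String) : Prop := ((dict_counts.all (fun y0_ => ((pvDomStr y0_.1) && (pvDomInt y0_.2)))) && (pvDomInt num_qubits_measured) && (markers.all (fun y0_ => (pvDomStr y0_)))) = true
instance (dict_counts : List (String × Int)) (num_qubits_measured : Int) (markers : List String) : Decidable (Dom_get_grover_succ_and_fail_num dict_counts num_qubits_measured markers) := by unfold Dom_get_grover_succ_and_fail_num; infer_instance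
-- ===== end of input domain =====

-- B replaces A's per-entry membership scan of markers with an index dict built once plus lookups
-- over the deduplicated markers (alternative decomposition; equivalence proved on the whole domain).

-- ===== PORT A =====
-- markers is typed List String here, so A's `if type(markers) is not list` wrap never fires and is omitted.
def get_grover_succ_and_fail_num (dict_counts : List (String × Int)) (num_qubits_measured : Int) (markers : List String) : Int × Int :=
  let st := dict_counts.foldl
    (fun (acc : Int × Int) kv =>
      (acc.1 + kv.2, if markers.contains kv.1 then acc.2 + kv.2 else acc.2))
    (0, 0)
  (st.2, st.1 - st.2)

-- ===== PORT B =====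
def get_grover_succ_and_fail_num_alt (dict_counts : List (String × Int)) (num_qubits_measured : Int) (markers : List String) : Int × Int :=
  let index : PySem.Dict String Int :=
    dict_counts.foldl (fun d kv => d.insert kv.1 (d.getD kv.1 0 + kv.2)) PySem.Dict.empty
  let total_counts := (dict_counts.map Prod.snd).sum
  let success_num :=
    (PySem.Set.ofList markers).foldl (fun acc m => acc + index.getD m 0) 0
  (success_num, total_counts - success_num)

-- ===== PRECONDITION & SPEC =====
def Spec_get_grover_succ_and_fail_num (dict_counts : List (String × Int)) (num_qubits_measured : Int) (markers : List String) (out : Int × Int) : Prop := out = get_grover_succ_and_fail_num_alt dict_counts num_qubits_measured markers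
instance (dict_counts : List (String × Int)) (num_qubits_measured : Int) (markers : List String) (out : Int × Int) : Decidable (Spec_get_grover_succ_and_fail_num dict_counts num_qubits_measured markers out) := by unfold Spec_get_grover_succ_and_fail_num; infer_instance

-- ===== CLAIM (what is proved, stated in full; the proofs are below) =====
def Claim_equal_get_grover_succ_and_fail_num : Prop := ∀ (dict_counts : List (String × Int)) (num_qubits_measured : Int) (markers : List String), Dom_get_grover_succ_and_fail_num dict_counts num_qubits_measured markers → Spec_get_grover_succ_and_fail_num dict_counts num_qubits_measured markers (get_grover_succ_and_fail_num dict_counts num_qubits_measured markers)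

-- ===== LEMMAS AND PROOFS =====

-- sum of the values of entries of dc whose key is m
def pvSumMatch (m : String) (dc : List (String × Int)) : Int :=
  ((dc.filter (fun kv => kv.1 == m)).map Prod.snd).sum

lemma pvSumMatch_cons (m : String) (kv : String × Int) (dc : List (String × Int)) :
    pvSumMatch m (kv :: dc) = (if kv.1 == m then kv.2 else 0) + pvSumMatch m dc := by
  unfold pvSumMatch
  by_cases h : kv.1 == m <;> simp [h]

-- the index dict built by B's first loop holds exactly the per-key accumulated sums
lemma pv_index_getD (dc : List (String × Int)) (d : PySem.Dict String Int) (m : String) :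
    (dc.foldl (fun d kv => d.insert kv.1 (d.getD kv.1 0 + kv.2)) d).getD m 0
      = d.getD m 0 + pvSumMatch m dc := by
  induction dc generalizing d with
  | nil => simp [pvSumMatch]
  | cons kv rest ih =>
    rw [List.foldl_cons, ih, pvSumMatch_cons]
    by_cases h : m = kv.1
    · subst h
      rw [PySem.Dict.getD_insert_self]
      simp
      ring
    · rw [PySem.Dict.getD_insert]
      have hb : (kv.1 == m) = false := by
        simp only [beq_eq_false_iff_ne]; exact fun hh => h hh.symm
      simp [h, hb]

lemma pv_sum_indicator (x : String) (v : Int) (S : List String) (h : S.Nodup) :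
    (S.map (fun m => if x == m then v else 0)).sum = if x ∈ S then v else 0 := by
  induction S with
  | nil => simp
  | cons a t ih =>
    rcases List.nodup_cons.mp h with ⟨ha, ht⟩
    by_cases hx : x = a
    · subst hx
      have hz : (t.map (fun m => if x = m then v else 0)).sum = 0 := by
        rw [List.sum_eq_zero]
        intro y hy
        rcases List.mem_map.mp hy with ⟨m, hm, rfl⟩
        have hxm : x ≠ m := fun hh => ha (hh ▸ hm)
        simp [hxm]
      simp [hz]
    · have hbeq : (x == a) = false := by simp [hx]
      simp only [List.map_cons, List.sum_cons, hbeq, ih ht, List.mem_cons]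
      simp [hx]

-- summing the per-key sums over a duplicate-free key list equals the filtered-value sum
lemma pv_sum_over_keys (S : List String) (markers : List String) (dc : List (String × Int))
    (hnd : S.Nodup) (hmem : ∀ x, x ∈ S ↔ x ∈ markers) :
    (S.map (fun m => pvSumMatch m dc)).sum
      = ((dc.filter (fun kv => markers.contains kv.1)).map Prod.snd).sum := by
  induction dc with
  | nil => simp [pvSumMatch]
  | cons kv rest ih =>
    have hsplit : (S.map (fun m => pvSumMatch m (kv :: rest))).sum
        = (S.map (fun m => if kv.1 == m then kv.2 else 0)).sum
          + (S.map (fun m => pvSumMatch m rest)).sum := by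
      rw [← List.sum_map_add]
      apply congrArg
      apply List.map_congr_left
      intro m _
      exact pvSumMatch_cons m kv rest
    rw [hsplit, pv_sum_indicator kv.1 kv.2 S hnd, ih]
    by_cases h : kv.1 ∈ markers
    · have h1 : kv.1 ∈ S := (hmem kv.1).mpr h
      simp [List.filter_cons, h1, h]
    · have h1 : kv.1 ∉ S := fun hh => h ((hmem kv.1).mp hh)
      simp [List.filter_cons, h1, h]

-- ===== VERDICT (by name: the statement is the Claim_ definition above) =====
theorem get_grover_succ_and_fail_num_spec : Claim_equal_get_grover_succ_and_fail_num := by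
  intro dc n markers _
  unfold Spec_get_grover_succ_and_fail_num
  simp only [get_grover_succ_and_fail_num, get_grover_succ_and_fail_num_alt]
  rw [PySem.List.foldl_prod_mk (f := fun acc (kv : String × Int) => acc + kv.2)
        (g := fun acc (kv : String × Int) => if markers.contains kv.1 then acc + kv.2 else acc)]
  rw [PySem.List.foldl_add (g := Prod.snd)]
  rw [PySem.List.foldl_if_eq_foldl_filter (p := fun kv : String × Int => markers.contains kv.1)
        (f := fun acc (kv : String × Int) => acc + kv.2)]
  rw [PySem.List.foldl_add (g := Prod.snd)]
  rw [PySem.List.foldl_add (g := fun m =>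
        (dc.foldl (fun d kv => d.insert kv.1 (d.getD kv.1 0 + kv.2)) PySem.Dict.empty).getD m 0)]
  have hidx : ∀ m, (dc.foldl (fun d kv => d.insert kv.1 (d.getD kv.1 0 + kv.2))
      PySem.Dict.empty).getD m 0 = pvSumMatch m dc := by
    intro m
    rw [pv_index_getD]
    simp [PySem.Dict.getD_empty]
  have hmapeq : ((PySem.Set.ofList markers).map (fun m =>
      (dc.foldl (fun d kv => d.insert kv.1 (d.getD kv.1 0 + kv.2)) PySem.Dict.empty).getD m 0))
      = (PySem.Set.ofList markers).map (fun m => pvSumMatch m dc) := by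
    apply List.map_congr_left; intro m _; exact hidx m
  rw [hmapeq, pv_sum_over_keys (PySem.Set.ofList markers) markers dc
        (PySem.Set.nodup_ofList markers) (fun x => PySem.Set.mem_ofList markers x)]
  simp
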